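-- pv_equiv track=rewrite | github.com/jzanetti/GradABM_ESR | etc/archive/test2.py | enlarge_differences
-- ===== SOURCE A (Python) =====
-- def enlarge_differences(values, scaling_factor):
--     new_values = [values[0]]
--
--     for i in range(1, len(values)):
--         diff = values[i] - values[i - 1]
--         enlarged_diff = diff * scaling_factor
--         new_value = new_values[-1] + enlarged_diff
--         new_values.append(new_value)
--
--     return new_values
-- ===== SOURCE B (Python) =====
-- def enlarge_differences(values, scaling_factor):
--     # two-pass: scaled per-step increments, then their running prefix sums
--     deltas = [values[0]] + [(b - a) * scaling_factor for a, b in zip(values, values[1:])]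
--     result = []
--     total = 0
--     for d in deltas:
--         total += d
--         result.append(total)
--     return result
-- ===== Notes on version B (the rewrite author's own statement) =====
-- stated objective: alternative
-- what changed: A interleaves difference-taking and accumulation in one index loop reading values[i], values[i-1] and new_values[-1]; B first builds the list of scaled increments from zipped adjacent pairs, then takes its running prefix sums in a second pass.
import Mathlib
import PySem

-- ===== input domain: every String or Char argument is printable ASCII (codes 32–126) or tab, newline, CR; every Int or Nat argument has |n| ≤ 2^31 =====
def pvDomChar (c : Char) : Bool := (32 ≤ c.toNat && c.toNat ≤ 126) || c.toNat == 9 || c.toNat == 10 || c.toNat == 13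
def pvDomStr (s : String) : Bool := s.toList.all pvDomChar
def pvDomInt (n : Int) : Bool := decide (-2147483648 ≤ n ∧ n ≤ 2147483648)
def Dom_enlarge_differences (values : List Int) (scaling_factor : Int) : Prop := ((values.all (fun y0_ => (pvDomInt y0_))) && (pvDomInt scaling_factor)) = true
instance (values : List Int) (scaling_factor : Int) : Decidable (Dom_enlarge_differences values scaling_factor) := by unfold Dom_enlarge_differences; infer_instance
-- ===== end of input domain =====

-- B replaces A's single index loop (reading values[i], values[i-1], new_values[-1]) by a
-- two-pass decomposition: scaled adjacent-pair increments via zip, then running prefix sums.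


-- ===== PORT A =====
-- new_values = [values[0]]; for i in range(1, len(values)): append new_values[-1] + (values[i]-values[i-1])*scaling_factor
def enlarge_differences (values : List Int) (scaling_factor : Int) : List Int :=
  match PySem.List.pyGet? values 0 with
  | none => []      -- values[0] raises IndexError in Python; excluded by Pre_
  | some v0 =>
    (PySem.List.pyRange 1 (values.length : Int) 1).foldl
      (fun new_values i =>
        let diff := PySem.List.pyGetD values i 0 - PySem.List.pyGetD values (i - 1) 0
        let enlarged_diff := diff * scaling_factor
        let new_value := PySem.List.pyGetD new_values (-1) 0 + enlarged_diff
        new_values ++ [new_value]) [v0]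

-- ===== PORT B =====
def enlarge_differences_alt (values : List Int) (scaling_factor : Int) : List Int :=
  match values with
  | [] => []        -- values[0] raises IndexError in Python; excluded by Pre_
  | v0 :: _ =>
    let deltas := v0 :: (List.zipWith (fun a b => (b - a) * scaling_factor) values (values.drop 1))
    (deltas.foldl (fun (st : List Int × Int) d => (st.1 ++ [st.2 + d], st.2 + d)) ([], 0)).1

-- ===== PRECONDITION & SPEC =====
-- Pre_ excludes only the empty list, on which A raises IndexError (values[0]).
def Pre_enlarge_differences (values : List Int) (scaling_factor : Int) : Prop := values ≠ []
instance (values : List Int) (scaling_factor : Int) : Decidable (Pre_enlarge_differences values scaling_factor) := by unfold Pre_enlarge_differences; infer_instance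
def pvWitness_enlarge_differences : List Int × Int := ([3, 5, 4], 2)

def Spec_enlarge_differences (values : List Int) (scaling_factor : Int) (out : List Int) : Prop := out = enlarge_differences_alt values scaling_factor
instance (values : List Int) (scaling_factor : Int) (out : List Int) : Decidable (Spec_enlarge_differences values scaling_factor out) := by unfold Spec_enlarge_differences; infer_instance

-- ===== CLAIM (what is proved, stated in full; the proofs are below) =====
def Claim_equal_enlarge_differences : Prop := ∀ (values : List Int) (scaling_factor : Int), Dom_enlarge_differences values scaling_factor → Pre_enlarge_differences values scaling_factor → Spec_enlarge_differences values scaling_factor (enlarge_differences values scaling_factor)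

-- ===== LEMMAS AND PROOFS =====

-- canonical result tail: given the previous input value and the last output value,
-- the remaining outputs for the remaining inputs
def pvAux (sf : Int) : Int → Int → List Int → List Int
  | _, _, [] => []
  | prev, last, x :: xs =>
    let nl := last + (x - prev) * sf
    nl :: pvAux sf x nl xs

-- A's loop over indices j+1 .. length-1 appends exactly pvAux
lemma loopA (vs : List Int) (sf : Int) :
    ∀ (rest : List Int) (j : Nat) (prev : Int) (acc : List Int) (last : Int),
      vs.drop j = prev :: rest →
      PySem.List.pyGetD acc (-1) 0 = last →
      (PySem.List.pyRange ((j : Int) + 1) (vs.length : Int) 1).foldl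
        (fun new_values i =>
          let diff := PySem.List.pyGetD vs i 0 - PySem.List.pyGetD vs (i - 1) 0
          let enlarged_diff := diff * sf
          let new_value := PySem.List.pyGetD new_values (-1) 0 + enlarged_diff
          new_values ++ [new_value]) acc
      = acc ++ pvAux sf prev last rest := by
  intro rest
  induction rest with
  | nil =>
    intro j prev acc last hdrop hlast
    have hlen : vs.length = j + 1 := by
      have := congrArg List.length hdrop
      simp [List.length_drop] at this
      omega
    rw [hlen]
    rw [PySem.List.pyRange_one_eq_nil (by push_cast; omega)]
    simp [pvAux]
  | cons x xs ih =>
    intro j prev acc last hdrop hlast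
    have hlen : j + 2 ≤ vs.length := by
      have := congrArg List.length hdrop
      simp [List.length_drop] at this
      omega
    rw [PySem.List.pyRange_one_cons (by omega)]
    simp only [List.foldl_cons]
    have hj : vs[j]? = some prev := by
      rw [← List.head?_drop, hdrop]; rfl
    have hdrop' : vs.drop (j + 1) = x :: xs := by
      have h1 := congrArg (List.drop 1) hdrop
      simpa [List.drop_drop, Nat.add_comm] using h1
    have hjx : vs[j + 1]? = some x := by
      rw [← List.head?_drop, hdrop']; rfl
    have e0 : ((j : Int) + 1 - 1) = (j : Int) := by ring
    have e1 : ((j : Int) + 1) = (((j + 1 : Nat)) : Int) := by push_cast; ring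
    have hprev : PySem.List.pyGetD vs ((j : Int) + 1 - 1) 0 = prev := by
      rw [e0, PySem.List.pyGetD_natCast]
      simp [List.getD_eq_getElem?_getD, hj]
    have hx : PySem.List.pyGetD vs ((j : Int) + 1) 0 = x := by
      rw [e1, PySem.List.pyGetD_natCast]
      simp [List.getD_eq_getElem?_getD, hjx]
    rw [hprev, hx, hlast]
    have hstep := ih (j + 1) x (acc ++ [last + (x - prev) * sf]) (last + (x - prev) * sf)
      hdrop' (PySem.List.pyGetD_neg_one_append_singleton acc _ 0)
    have e2 : ((j : Int) + 1 + 1) = (((j + 1 : Nat)) : Int) + 1 := by push_cast; ring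
    rw [e2, hstep]
    simp [pvAux, List.append_assoc]

-- running prefix sums of a list of increments, starting from total
def pvPsums : List Int → Int → List Int
  | [], _ => []
  | d :: ds, t => (t + d) :: pvPsums ds (t + d)

-- B's accumulation loop computes prefix sums
lemma foldlB : ∀ (ds : List Int) (out : List Int) (total : Int),
    (ds.foldl (fun (st : List Int × Int) d => (st.1 ++ [st.2 + d], st.2 + d)) (out, total)).1
      = out ++ pvPsums ds total := by
  intro ds
  induction ds with
  | nil => intro out total; simp [pvPsums]
  | cons d ds ih =>
    intro out total
    simp only [List.foldl_cons, pvPsums]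
    rw [ih]
    simp [List.append_assoc]

-- prefix sums of B's zipped scaled increments coincide with the canonical tail
lemma zipB (sf : Int) : ∀ (rest : List Int) (prev last : Int),
    pvPsums (List.zipWith (fun a b => (b - a) * sf) (prev :: rest) rest) last
      = pvAux sf prev last rest := by
  intro rest
  induction rest with
  | nil => intro prev last; simp [pvPsums, pvAux]
  | cons x xs ih =>
    intro prev last
    simp only [List.zipWith_cons_cons, pvPsums, pvAux]
    rw [ih]

theorem enlarge_differences_spec : Claim_equal_enlarge_differences := by
  intro values sf _ hpre
  unfold Spec_enlarge_differences
  cases values with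
  | nil => exact absurd rfl hpre
  | cons v0 rest =>
    have hA : enlarge_differences (v0 :: rest) sf = [v0] ++ pvAux sf v0 v0 rest := by
      unfold enlarge_differences
      have hget : PySem.List.pyGet? (v0 :: rest) 0 = some v0 := by
        simp [PySem.List.pyGet?, PySem.List.pyIdx?]
      rw [hget]
      have e3 : (1 : Int) = ((0 : Nat) : Int) + 1 := by norm_num
      rw [e3]
      exact loopA (v0 :: rest) sf rest 0 v0 [v0] v0 (by simp)
        (by simp [PySem.List.pyGetD, PySem.List.pyGet?, PySem.List.pyIdx?])
    have hB : enlarge_differences_alt (v0 :: rest) sf = [v0] ++ pvAux sf v0 v0 rest := by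
      unfold enlarge_differences_alt
      simp only [List.drop_one, List.tail_cons, List.foldl_cons]
      rw [foldlB]
      simp [zipB]
    rw [hA, hB]
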